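-- pv_equiv track=rewrite | github.com/pavangururajan/InterviewPreparation | google/MaxValueOfWeightedSum.py | max_value_of_weighted_sum
-- ===== SOURCE A (Python) =====
-- def max_value_of_weighted_sum(nums):
--     total = sum(nums)
--     currentVal = sum([i*j for i, j in enumerate(nums)])
--     maxVal = currentVal
--     for i in range(len(nums)):
--         currentVal += len(nums) * nums[i] - total
--         maxVal = max(maxVal, currentVal)
--     return maxVal
-- ===== SOURCE B (Python) =====
-- def max_value_of_weighted_sum(nums):
--     # Brute force: evaluate the weighted sum of every rotation directly.
--     n = len(nums)
--     best = sum(i * v for i, v in enumerate(nums))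
--     for k in range(1, n):
--         best = max(best, sum(i * nums[(i + k) % n] for i in range(n)))
--     return best
-- ===== Notes on version B (the rewrite author's own statement) =====
-- stated objective: alternative
-- what changed: B brute-forces every rotation, recomputing each rotation's weighted sum from scratch with modular indexing, instead of A's O(1) incremental update currentVal += n*nums[i] - total.
import Mathlib
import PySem

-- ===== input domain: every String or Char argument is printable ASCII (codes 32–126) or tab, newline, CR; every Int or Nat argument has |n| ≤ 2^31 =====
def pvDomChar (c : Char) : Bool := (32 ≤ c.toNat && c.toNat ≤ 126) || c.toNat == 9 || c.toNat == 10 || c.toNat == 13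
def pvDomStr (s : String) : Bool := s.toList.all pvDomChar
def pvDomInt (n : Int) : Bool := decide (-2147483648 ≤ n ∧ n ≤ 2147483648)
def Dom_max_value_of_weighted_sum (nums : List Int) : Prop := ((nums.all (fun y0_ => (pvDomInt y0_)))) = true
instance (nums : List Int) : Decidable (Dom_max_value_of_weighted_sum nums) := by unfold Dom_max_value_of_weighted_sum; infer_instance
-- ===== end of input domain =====

-- B replaces A's O(1) incremental update per rotation by a direct brute-force rescan of every
-- rotation's weighted sum (an alternative, structurally different algorithm; not faster).

-- ===== PORT A =====
-- literal port of A: total = sum(nums); currentVal = sum(i*j for i,j in enumerate(nums));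
-- then for i in range(len(nums)): currentVal += len(nums)*nums[i] - total; maxVal = max(maxVal, currentVal)
def max_value_of_weighted_sum (nums : List Int) : Int :=
  let total := nums.sum
  let currentVal := ((PySem.List.enumerate nums).map (fun p => p.1 * p.2)).sum
  let maxVal := currentVal
  let st := (PySem.List.pyRange 0 (nums.length : Int) 1).foldl
    (fun (st : Int × Int) i =>
      let c := st.1 + (nums.length : Int) * PySem.List.pyGetD nums i 0 - total
      (c, max st.2 c)) (currentVal, maxVal)
  st.2

-- ===== PORT B =====
-- literal port of B: best = weighted sum of rotation 0; for k in range(1, n):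
--   best = max(best, sum(i * nums[(i+k) % n] for i in range(n)))
def max_value_of_weighted_sum_alt (nums : List Int) : Int :=
  let n := (nums.length : Int)
  let best := ((PySem.List.enumerate nums).map (fun p => p.1 * p.2)).sum
  (PySem.List.pyRange 1 n 1).foldl
    (fun best k =>
      max best (((PySem.List.pyRange 0 n 1).map
        (fun i => i * PySem.List.pyGetD nums (PySem.Int.mod (i + k) n) 0)).sum)) best

-- ===== PRECONDITION & SPEC =====
def Spec_max_value_of_weighted_sum (nums : List Int) (out : Int) : Prop := out = max_value_of_weighted_sum_alt nums
instance (nums : List Int) (out : Int) : Decidable (Spec_max_value_of_weighted_sum nums out) := by unfold Spec_max_value_of_weighted_sum; infer_instance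

-- ===== CLAIM (what is proved, stated in full; the proofs are below) =====
def Claim_equal_max_value_of_weighted_sum : Prop := ∀ (nums : List Int), Dom_max_value_of_weighted_sum nums → Spec_max_value_of_weighted_sum nums (max_value_of_weighted_sum nums)

-- ===== LEMMAS AND PROOFS =====

-- weighted sum of a list with the first element weighted c, the next c+1, …
def wsFrom (c : Int) : List Int → Int
  | [] => 0
  | a :: t => c * a + wsFrom (c + 1) t

-- weighted sum of the k-th left rotation of l
def Wr (l : List Int) (k : Nat) : Int := wsFrom 0 (l.drop k ++ l.take k)

theorem enum_sum (l : List Int) (s : Int) :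
    ((PySem.List.enumerate l s).map (fun p => p.1 * p.2)).sum = wsFrom s l := by
  induction l generalizing s with
  | nil => simp [PySem.List.enumerate_nil, wsFrom]
  | cons a t ih => simp [PySem.List.enumerate_cons, wsFrom, ih]

theorem wsFrom_shift (t : List Int) (c : Int) :
    wsFrom (c + 1) t = wsFrom c t + t.sum := by
  induction t generalizing c with
  | nil => simp [wsFrom]
  | cons a t ih => simp [wsFrom, ih (c + 1)]; ring

theorem wsFrom_append_singleton (t : List Int) (a c : Int) :
    wsFrom c (t ++ [a]) = wsFrom c t + (c + t.length) * a := by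
  induction t generalizing c with
  | nil => simp [wsFrom]
  | cons b t ih => simp [wsFrom, ih (c + 1)]; ring

theorem Wr_succ (l : List Int) (k : Nat) (hk : k < l.length) :
    Wr l (k + 1) = Wr l k + (l.length : Int) * l.getD k 0 - l.sum := by
  have hdrop : l.drop k = l[k] :: l.drop (k + 1) := List.drop_eq_getElem_cons hk
  have htake : l.take (k + 1) = l.take k ++ [l[k]] := by
    rw [List.take_add_one, List.getElem?_eq_getElem hk]; rfl
  have hlsum : l.sum = l[k] + (l.drop (k + 1) ++ l.take k).sum := by
    conv_lhs => rw [← List.take_append_drop k l, hdrop]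
    rw [List.sum_append, List.sum_cons, List.sum_append]; ring
  have hlen : ((l.drop (k + 1) ++ l.take k).length : Int) = (l.length : Int) - 1 := by
    simp; omega
  have hget : l.getD k 0 = l[k] := List.getD_eq_getElem l 0 hk
  unfold Wr
  rw [hdrop, htake, ← List.append_assoc, wsFrom_append_singleton]
  show wsFrom 0 (l.drop (k+1) ++ l.take k) + _ = 0 * l[k] + wsFrom (0+1) (l.drop (k+1) ++ l.take k) + _ - _
  rw [wsFrom_shift, hget, hlsum, hlen]
  ring

theorem Wr_length (l : List Int) : Wr l l.length = Wr l 0 := by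
  simp [Wr]

-- indexing a rotation = modular indexing of the original list
theorem rotGet (l : List Int) (k i : Nat) (hk : k ≤ l.length) (hi : i < l.length) :
    (l.drop k ++ l.take k).getD i 0 = l.getD ((i + k) % l.length) 0 := by
  have hld : (l.drop k).length = l.length - k := List.length_drop
  rcases Nat.lt_or_ge i (l.length - k) with h | h
  · have hm : (i + k) % l.length = i + k := Nat.mod_eq_of_lt (by omega)
    rw [hm, List.getD_eq_getElem?_getD, List.getElem?_append_left (by rw [hld]; omega),
        List.getElem?_drop, List.getD_eq_getElem?_getD]
    congr 2; omega
  · have hm : (i + k) % l.length = i + k - l.length := by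
      rw [Nat.mod_eq_sub_mod (by omega)]
      exact Nat.mod_eq_of_lt (by omega)
    rw [hm, List.getD_eq_getElem?_getD, List.getElem?_append_right (by rw [hld]; omega),
        hld, List.getElem?_take_of_lt (by omega), List.getD_eq_getElem?_getD]
    congr 2; omega

theorem sum_range_ws (m : List Int) (c : Int) :
    ((List.range m.length).map (fun (i : Nat) => (c + (i : Int)) * m.getD i 0)).sum = wsFrom c m := by
  induction m generalizing c with
  | nil => simp [wsFrom]
  | cons a t ih =>
    rw [List.length_cons, List.range_succ_eq_map, List.map_cons, List.map_map, List.sum_cons]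
    have : (List.map ((fun (i : Nat) => (c + (i : Int)) * (a :: t).getD i 0) ∘ Nat.succ) (List.range t.length))
        = (List.range t.length).map (fun (i : Nat) => ((c + 1) + (i : Int)) * t.getD i 0) := by
      apply List.map_congr_left; intro i _
      simp only [Function.comp, Nat.succ_eq_add_one, List.getD_cons_succ]; push_cast; ring
    rw [this, ih (c + 1)]
    simp [wsFrom]

theorem inner_eq (l : List Int) (k : Nat) (hk : k ≤ l.length) :
    (((PySem.List.pyRange 0 (l.length : Int) 1).map
      (fun i => i * PySem.List.pyGetD l (PySem.Int.mod (i + (k : Int)) (l.length : Int)) 0))).sum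
    = Wr l k := by
  rcases Nat.eq_zero_or_pos l.length with h0 | hpos
  · rw [h0]; simp [PySem.List.pyRange, Wr]
    rw [List.length_eq_zero_iff.mp h0]; simp [wsFrom]
  · rw [PySem.List.pyRange_zero_nat, List.map_map]
    have hcongr : (List.range l.length).map
        ((fun i => i * PySem.List.pyGetD l (PySem.Int.mod (i + (k : Int)) (l.length : Int)) 0) ∘ (fun (j : Nat) => (j : Int)))
        = (List.range l.length).map (fun (j : Nat) => ((0 : Int) + (j : Int)) * (l.drop k ++ l.take k).getD j 0) := by
      apply List.map_congr_left; intro j hj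
      rw [List.mem_range] at hj
      simp only [Function.comp]
      have hmod : PySem.Int.mod ((j : Int) + (k : Int)) (l.length : Int)
          = (((j + k) % l.length : Nat) : Int) := by
        rw [PySem.Int.mod_eq_emod_of_pos (by exact_mod_cast hpos)]
        push_cast [Int.natCast_mod]; ring_nf
      rw [hmod, PySem.List.pyGetD_natCast, ← rotGet l k j hk hj]
      ring_nf
    rw [hcongr]
    have hlen : l.length = (l.drop k ++ l.take k).length := by simp; omega
    rw [hlen, sum_range_ws]
    rfl

-- A's loop invariant: after j iterations currentVal = Wr l j and maxVal = max over Wr l 0 .. Wr l j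
theorem A_inv (l : List Int) (j : Nat) (hj : j ≤ l.length) :
    (List.range j).foldl
      (fun (st : Int × Int) i =>
        let c := st.1 + (l.length : Int) * l.getD i 0 - l.sum
        (c, max st.2 c)) (Wr l 0, Wr l 0)
    = (Wr l j, ((List.range j).map (fun i => Wr l (i + 1))).foldl max (Wr l 0)) := by
  induction j with
  | zero => simp
  | succ j ih =>
    rw [List.range_succ, List.foldl_append, ih (by omega), List.map_append, List.foldl_append]
    simp only [List.foldl_cons, List.foldl_nil, List.map_cons, List.map_nil]
    rw [← Wr_succ l j (by omega)]

theorem A_eq (l : List Int) :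
    max_value_of_weighted_sum l
    = ((List.range l.length).map (fun i => Wr l (i + 1))).foldl max (Wr l 0) := by
  unfold max_value_of_weighted_sum
  simp only [enum_sum]
  have hw0 : wsFrom 0 l = Wr l 0 := by simp [Wr]
  rw [hw0, PySem.List.pyRange_zero_nat, List.foldl_map]
  have : (List.range l.length).foldl
      (fun (st : Int × Int) (i : Nat) =>
        let c := st.1 + (l.length : Int) * PySem.List.pyGetD l (i : Int) 0 - l.sum
        (c, max st.2 c)) (Wr l 0, Wr l 0)
      = (List.range l.length).foldl
      (fun (st : Int × Int) i =>
        let c := st.1 + (l.length : Int) * l.getD i 0 - l.sum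
        (c, max st.2 c)) (Wr l 0, Wr l 0) := by
    congr 1; funext st i; simp [PySem.List.pyGetD_natCast]
  rw [this, A_inv l l.length (le_refl _)]

theorem B_eq (l : List Int) :
    max_value_of_weighted_sum_alt l
    = ((List.range (l.length - 1)).map (fun i => Wr l (i + 1))).foldl max (Wr l 0) := by
  unfold max_value_of_weighted_sum_alt
  simp only [enum_sum]
  have hw0 : wsFrom 0 l = Wr l 0 := by simp [Wr]
  rw [hw0]
  have hrange : PySem.List.pyRange 1 (l.length : Int) 1
      = (List.range (l.length - 1)).map (fun (k : Nat) => ((k + 1 : Nat) : Int)) := by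
    rw [PySem.List.pyRange_one]
    have hn : ((l.length : Int) - 1).toNat = l.length - 1 := by omega
    rw [hn]
    apply List.map_congr_left; intro j _; push_cast; ring
  rw [hrange, List.foldl_map,
      show ((List.range (l.length - 1)).map (fun i => Wr l (i + 1))).foldl max (Wr l 0)
        = (List.range (l.length - 1)).foldl (fun b i => max b (Wr l (i + 1))) (Wr l 0)
      from List.foldl_map]
  apply PySem.List.foldl_congr_mem
  intro b j hj
  rw [List.mem_range] at hj
  rw [inner_eq l (j + 1) (by omega)]

-- ===== VERDICT (by name: the statement is the Claim_ definition above) =====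
theorem max_value_of_weighted_sum_spec : Claim_equal_max_value_of_weighted_sum := by
  intro nums _
  unfold Spec_max_value_of_weighted_sum
  rw [A_eq, B_eq]
  rcases Nat.eq_zero_or_pos nums.length with h0 | hpos
  · rw [h0]
  · have hsplit : nums.length = (nums.length - 1) + 1 := by omega
    rw [hsplit, List.range_succ, List.map_append, List.foldl_append]
    simp only [List.map_cons, List.map_nil, List.foldl_cons, List.foldl_nil]
    rw [← hsplit, Wr_length]
    exact max_eq_left ((PySem.List.le_foldl_max _ _).1)
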